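-- pv_equiv track=rewrite | github.com/Rouabhia2002/Dna-analysis | main.py | stop_positions
-- ===== SOURCE A (Python) =====
-- DNA_ALPHABET = set("AGCT")
--
-- STOP_CODONS = {"TAA", "TAG", "TGA"}
--
-- def clean_seq(seq: str) -> str:
--     """Remove spaces/newlines and uppercase."""
--     return seq.replace(" ", "").replace("\n", "").upper()
--
-- def validate_dna(seq: str) -> None:
--     """Raise ValueError if sequence contains characters not in A,T,C,G."""
--     s = clean_seq(seq)
--     bad = [base for base in s if base not in DNA_ALPHABET]
--     if bad:
--         bad_unique = sorted(set(bad))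
--         raise ValueError(f"Invalid DNA sequence: only A,T,C,G allowed. Found: {bad_unique}")
--
-- def stop_positions(seq: str) -> list[int]:
--     """Return nucleotide positions of stop codons in the sequence (0-based)."""
--     validate_dna(seq)
--     s = clean_seq(seq)
--
--     pos = []
--     for i in range(0, len(s) - 2):
--         if s[i:i + 3] in STOP_CODONS:
--             pos.append(i)
--     return pos
-- ===== SOURCE B (Python) =====
-- DNA_ALPHABET = set("AGCT")
--
-- STOP_CODONS = {"TAA", "TAG", "TGA"}
--
-- def clean_seq(seq: str) -> str:
--     """Remove spaces/newlines and uppercase."""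
--     return seq.replace(" ", "").replace("\n", "").upper()
--
-- def validate_dna(seq: str) -> None:
--     """Raise ValueError if sequence contains characters not in A,T,C,G."""
--     s = clean_seq(seq)
--     bad = [base for base in s if base not in DNA_ALPHABET]
--     if bad:
--         bad_unique = sorted(set(bad))
--         raise ValueError(f"Invalid DNA sequence: only A,T,C,G allowed. Found: {bad_unique}")
--
-- def stop_positions(seq: str) -> list[int]:
--     """Return nucleotide positions of stop codons in the sequence (0-based)."""
--     validate_dna(seq)
--     s = clean_seq(seq)
--
--     pos = []
--     for codon in ("TAA", "TAG", "TGA"):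
--         start = 0
--         while True:
--             j = s.find(codon, start)
--             if j == -1:
--                 break
--             pos.append(j)
--             start = j + 1
--     pos.sort()
--     return pos
-- ===== Notes on version B (the rewrite author's own statement) =====
-- stated objective: alternative
-- what changed: Replaces the single per-position slice-membership scan with three targeted str.find(codon, start) while-loops (one per stop codon, advancing by 1 to keep overlaps) whose hit indices are merged and sorted.
import Mathlib
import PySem

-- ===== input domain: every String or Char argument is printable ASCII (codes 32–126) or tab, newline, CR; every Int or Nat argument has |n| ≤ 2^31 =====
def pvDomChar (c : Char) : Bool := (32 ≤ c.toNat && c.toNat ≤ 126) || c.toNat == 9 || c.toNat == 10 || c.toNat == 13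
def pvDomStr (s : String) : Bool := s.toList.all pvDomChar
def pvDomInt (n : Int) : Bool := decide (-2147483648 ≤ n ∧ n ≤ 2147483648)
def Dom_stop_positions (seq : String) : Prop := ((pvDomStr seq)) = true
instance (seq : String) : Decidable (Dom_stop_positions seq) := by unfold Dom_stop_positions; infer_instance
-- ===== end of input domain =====

-- B replaces A's single per-position slice-membership scan by three str.find-based scans
-- (one per stop codon, each advancing its start by 1) merged and sorted: an alternative
-- algorithm of similar cost. A and B raise identically on invalid input (outside Pre_).

-- ===== PORT A =====
-- shared module helper clean_seq (both Pythons call it verbatim)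
def clean_seq (seq : String) : String :=
  PySem.Str.upper (PySem.Str.replace (PySem.Str.replace seq " " "") "\n" "")

def STOP_CODONS : List String := PySem.Set.ofList ["TAA", "TAG", "TGA"]

def stop_positions (seq : String) : List Int :=
  let s := clean_seq seq
  (PySem.List.pyRange 0 ((s.toList.length : Int) - 2) 1).foldl
    (fun pos i => if PySem.Str.slice s (some i) (some (i + 3)) ∈ STOP_CODONS then pos ++ [i] else pos) []

-- ===== PORT B =====
-- the inner 'while True: j = s.find(codon, start); …' loop of Source B; fuel (called with len+1,
-- an upper bound on the number of iterations) only makes the recursion structural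
def findAll (s codon : String) : Nat → Nat → List Int
  | 0, _ => []
  | fuel + 1, start =>
      let j := PySem.Str.findFrom s codon (start : Int) none
      if j = -1 then [] else j :: findAll s codon fuel (j.toNat + 1)

def stop_positions_alt (seq : String) : List Int :=
  let s := clean_seq seq
  let pos := ["TAA", "TAG", "TGA"].foldl
    (fun pos codon => pos ++ findAll s codon (s.toList.length + 1) 0) []
  PySem.List.sorted pos (fun x => x) false

-- ===== PRECONDITION & SPEC =====
-- Pre_ excludes exactly the inputs on which A's validate_dna raises ValueError: within the
-- ASCII domain A returns iff every character is an A/G/C/T letter (either case, cleaning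
-- uppercases) or a space/newline (which cleaning removes); B raises identically there.
def Pre_stop_positions (seq : String) : Prop :=
  seq.toList.all (fun c => c ∈ ['A', 'G', 'C', 'T', 'a', 'g', 'c', 't', ' ', '\n']) = true
instance (seq : String) : Decidable (Pre_stop_positions seq) := by
  unfold Pre_stop_positions; infer_instance

def pvWitness_stop_positions : String := "TAATGA"

def Spec_stop_positions (seq : String) (out : List Int) : Prop := out = stop_positions_alt seq
instance (seq : String) (out : List Int) : Decidable (Spec_stop_positions seq out) := by
  unfold Spec_stop_positions; infer_instance

-- ===== CLAIM (what is proved, stated in full; the proofs are below) =====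
def Claim_equal_stop_positions : Prop :=
  ∀ (seq : String), Dom_stop_positions seq → Pre_stop_positions seq →
    Spec_stop_positions seq (stop_positions seq)

-- ===== LEMMAS AND PROOFS =====

def occAt (l codon : List Char) (i : Nat) : Bool := decide (codon <+: l.drop i)

def hits (l codon : List Char) (start : Nat) : List Int :=
  ((List.range l.length).filter (fun i => start ≤ i && occAt l codon i)).map (fun (i : Nat) => (i : Int))

theorem filter_range_min (n m start : Nat) (q : Nat → Bool) (hm : m < n) (hq : q m = true)
    (hsm : start ≤ m) (hmin : ∀ i, start ≤ i → i < m → q i = false) :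
    (List.range n).filter (fun i => start ≤ i && q i)
      = m :: (List.range n).filter (fun i => m + 1 ≤ i && q i) := by
  have hn : n = (m + 1) + (n - (m + 1)) := by omega
  rw [hn, List.range_add, List.range_succ]
  simp only [List.filter_append]
  have h1 : (List.range m).filter (fun i => start ≤ i && q i) = [] := by
    rw [List.filter_eq_nil_iff]
    intro i hi
    simp only [List.mem_range] at hi
    by_cases hs : start ≤ i
    · simp [hs, hmin i hs hi]
    · simp [hs]
  have h1' : ((List.range m).filter (fun i => m + 1 ≤ i && q i)) = [] := by
    rw [List.filter_eq_nil_iff]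
    intro i hi
    simp only [List.mem_range] at hi
    have : ¬ (m + 1 ≤ i) := by omega
    simp [this]
  have h2 : ([m].filter (fun i => start ≤ i && q i)) = [m] := by simp [hsm, hq]
  have h2' : ([m].filter (fun i => m + 1 ≤ i && q i)) = [] := by simp
  have h3 : ((List.range (n - (m+1))).map (fun x => m + 1 + x)).filter (fun i => start ≤ i && q i)
      = ((List.range (n - (m+1))).map (fun x => m + 1 + x)).filter (fun i => m + 1 ≤ i && q i) := by
    apply List.filter_congr
    intro i hi
    simp only [List.mem_map] at hi
    obtain ⟨x, _, rfl⟩ := hi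
    have hs : start ≤ m + 1 + x := by omega
    have hs' : m + 1 ≤ m + 1 + x := by omega
    simp [hs, hs']
  rw [h1, h1', h2, h2', h3]
  simp

theorem filter_or_perm {α : Type} (l : List α) (p q : α → Bool)
    (hd : ∀ x ∈ l, ¬(p x = true ∧ q x = true)) :
    (l.filter (fun x => p x || q x)).Perm (l.filter p ++ l.filter q) := by
  induction l with
  | nil => simp
  | cons a t ih =>
    have ih' := ih (fun x hx => hd x (List.mem_cons_of_mem a hx))
    by_cases hp : p a = true
    · have hq : q a = false := by
        by_contra h
        exact hd a (List.mem_cons_self) ⟨hp, by simpa using h⟩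
      simp only [List.filter_cons, hp, hq]
      simpa using ih'.cons a
    · by_cases hq : q a = true
      · simp only [List.filter_cons, hp, hq]
        simp only [Bool.false_or, if_true]
        refine List.Perm.trans (ih'.cons a) ?_
        exact (List.perm_middle).symm
      · simp only [List.filter_cons, hp, hq]
        simpa using ih'

theorem hits_nil (l codon : List Char) (start : Nat)
    (h : ∀ i, start ≤ i → ¬ codon <+: l.drop i) : hits l codon start = [] := by
  unfold hits
  have hfil : (List.range l.length).filter (fun i => start ≤ i && occAt l codon i) = [] := by
    rw [List.filter_eq_nil_iff]
    intro i _
    by_cases hs : start ≤ i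
    · simp [occAt, hs, h i hs]
    · simp [hs]
  rw [hfil]
  rfl

theorem findAll_eq (s codon : String) (hc : codon.toList ≠ [])
    (fuel : Nat) : ∀ (start : Nat), start ≤ s.toList.length →
    s.toList.length + 1 - start ≤ fuel →
    findAll s codon fuel start = hits s.toList codon.toList start := by
  induction fuel with
  | zero => intro start hst hf; omega
  | succ fuel ih =>
    intro start hst hf
    show (if PySem.Str.findFrom s codon (start : Int) none = -1 then []
      else PySem.Str.findFrom s codon (start : Int) none ::
        findAll s codon fuel ((PySem.Str.findFrom s codon (start : Int) none).toNat + 1))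
      = hits s.toList codon.toList start
    rw [PySem.Str.findFrom_eq]
    set l := s.toList with hl
    set c := codon.toList with hcdef
    by_cases h : PySem.Chars.findFrom l c (start : Int) none = -1
    · rw [if_pos h]
      have hni := (PySem.Chars.findFrom_natCast_eq_neg_one_iff l c start hst).1 h
      refine (hits_nil l c start ?_).symm
      intro i hi hpre
      apply hni
      have hdrop : l.drop i = (l.drop start).drop (i - start) := by
        rw [List.drop_drop]; congr 1; omega
      refine List.IsInfix.trans (hpre.isInfix) ?_
      rw [hdrop]
      exact (List.drop_suffix _ _).isInfix
    · rw [if_neg h]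
      obtain ⟨h1, h2, h3⟩ := PySem.Chars.findFrom_natCast_spec l c start hst h
      set j := PySem.Chars.findFrom l c (start : Int) none with hj
      have hj0 : (0:Int) ≤ j := le_trans (by exact_mod_cast Nat.zero_le start) h1
      set m := j.toNat with hm
      have hjm : j = (m : Int) := (Int.toNat_of_nonneg hj0).symm
      have hsm : start ≤ m := by omega
      have hclen : 0 < c.length := List.length_pos_of_ne_nil hc
      have hmn : m < l.length := by
        have := h2.length_le
        rw [List.length_drop] at this
        omega
      have ihe := ih (m + 1) (by omega) (by omega)
      rw [ihe]
      have hqm : occAt l c m = true := by simp [occAt, h2]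
      have hmin : ∀ i, start ≤ i → i < m → occAt l c i = false := by
        intro i hi1 hi2
        simp [occAt, h3 i hi1 hi2]
      unfold hits
      rw [filter_range_min l.length m start _ hmn hqm hsm hmin]
      rw [hjm]
      rfl

theorem filter_range_sub (n m : Nat) (q : Nat → Bool) (hmn : m ≤ n)
    (h : ∀ i, q i = true → i < m) :
    (List.range n).filter q = (List.range m).filter q := by
  have hn : n = m + (n - m) := by omega
  rw [hn, List.range_add, List.filter_append]
  have hnil : ((List.range (n - m)).map (fun x => m + x)).filter q = [] := by
    rw [List.filter_eq_nil_iff]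
    intro i hi
    simp only [List.mem_map] at hi
    obtain ⟨x, _, rfl⟩ := hi
    intro hq
    exact absurd (h _ hq) (by omega)
  rw [hnil, List.append_nil]

theorem mem_stop (x : String) :
    x ∈ STOP_CODONS ↔ (x.toList = "TAA".toList ∨ x.toList = "TAG".toList ∨ x.toList = "TGA".toList) := by
  have h : STOP_CODONS = ["TAA", "TAG", "TGA"] := by decide
  rw [h]
  simp only [List.mem_cons, List.not_mem_nil, or_false]
  constructor
  · intro hx
    rcases hx with h1 | h1 | h1 <;> subst h1 <;> simp
  · intro hx
    rcases hx with h1 | h1 | h1 <;>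
      simp [String.toList_injective h1]

def stopQ (l : List Char) (i : Nat) : Bool :=
  occAt l "TAA".toList i || occAt l "TAG".toList i || occAt l "TGA".toList i

theorem stopQ_lt (l : List Char) (i : Nat) (h : stopQ l i = true) : i < l.length - 2 := by
  have h3 : ∀ c : List Char, c.length = 3 → occAt l c i = true → i < l.length - 2 := by
    intro c hc3 hocc
    simp only [occAt, decide_eq_true_eq] at hocc
    have := hocc.length_le
    rw [List.length_drop, hc3] at this
    omega
  simp only [stopQ, Bool.or_eq_true] at h
  rcases h with (h1 | h1) | h1
  · exact h3 _ (by decide) h1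
  · exact h3 _ (by decide) h1
  · exact h3 _ (by decide) h1

theorem portA_eq (seq : String) :
    stop_positions seq =
      ((List.range (clean_seq seq).toList.length).filter
        (stopQ (clean_seq seq).toList)).map (fun (i : Nat) => (i : Int)) := by
  unfold stop_positions
  set s := clean_seq seq with hs
  set l := s.toList with hl
  set n := l.length with hn
  have hfold := PySem.List.foldl_append_if
    (fun i : Int => decide (PySem.Str.slice s (some i) (some (i + 3)) ∈ STOP_CODONS))
    (fun i => i) (PySem.List.pyRange 0 ((n : Int) - 2) 1) []
  simp only [decide_eq_true_eq] at hfold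
  rw [hfold, List.nil_append]
  have hrange : PySem.List.pyRange 0 ((n : Int) - 2) 1
      = (List.range (n - 2)).map (fun (k : Nat) => (k : Int)) := by
    rw [PySem.List.pyRange_one]
    have : (((n : Int) - 2) - 0).toNat = n - 2 := by omega
    rw [this]
    simp only [zero_add]
  rw [hrange, List.filter_map]
  have hcong : (List.range (n - 2)).filter
      ((fun i : Int => decide (PySem.Str.slice s (some i) (some (i + 3)) ∈ STOP_CODONS)) ∘ (fun k : Nat => (k : Int)))
      = (List.range (n - 2)).filter (stopQ l) := by
    apply List.filter_congr
    intro i _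
    simp only [Function.comp_apply, stopQ]
    rw [Bool.eq_iff_iff]
    simp only [decide_eq_true_eq, Bool.or_eq_true, occAt]
    have hslice : (PySem.Str.slice s (some (i : Int)) (some ((i : Int) + 3))).toList
        = (l.drop i).take 3 := by
      rw [PySem.Str.toList_slice, PySem.Chars.slice_eq_listSlice, ← hl]
      have h3 : ((i : Int) + 3) = ((i : Int) + ((3 : Nat) : Int)) := by norm_num
      rw [h3, PySem.List.slice_natCast_add]
    have hp : ∀ c : List Char, c.length = 3 → ((c <+: l.drop i) ↔ (l.drop i).take 3 = c) := by
      intro c h3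
      rw [List.prefix_iff_eq_take, h3]
      exact eq_comm
    rw [mem_stop, hslice, hp _ (by decide), hp _ (by decide), hp _ (by decide)]
    exact or_assoc.symm
  rw [hcong, filter_range_sub n (n - 2) (stopQ l) (by omega) (stopQ_lt l)]
  simp [List.map_map, Function.comp]

theorem occAt_disj (l c1 c2 : List Char) (i : Nat) (hlen : c1.length = c2.length)
    (hne : c1 ≠ c2) : ¬(occAt l c1 i = true ∧ occAt l c2 i = true) := by
  rintro ⟨h1, h2⟩
  simp only [occAt, decide_eq_true_eq] at h1 h2
  rw [List.prefix_iff_eq_take] at h1 h2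
  rw [hlen] at h1
  exact hne (h1.trans h2.symm)

theorem stop_filter_perm (l : List Char) :
    ((List.range l.length).filter (stopQ l)).Perm
      (((List.range l.length).filter (occAt l "TAA".toList)
        ++ (List.range l.length).filter (occAt l "TAG".toList))
        ++ (List.range l.length).filter (occAt l "TGA".toList)) := by
  have hstop : stopQ l = fun i => (occAt l "TAA".toList i || occAt l "TAG".toList i) || occAt l "TGA".toList i := rfl
  have h1 := filter_or_perm (List.range l.length)
    (fun i => occAt l "TAA".toList i || occAt l "TAG".toList i) (occAt l "TGA".toList)
    (by
      intro x _
      rintro ⟨hpq, hc⟩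
      rcases Bool.or_eq_true_iff.1 hpq with h | h
      · exact occAt_disj l "TAA".toList "TGA".toList x (by decide) (by decide) ⟨h, hc⟩
      · exact occAt_disj l "TAG".toList "TGA".toList x (by decide) (by decide) ⟨h, hc⟩)
  have h2 := filter_or_perm (List.range l.length)
    (occAt l "TAA".toList) (occAt l "TAG".toList)
    (by
      intro x _
      exact occAt_disj l "TAA".toList "TAG".toList x (by decide) (by decide))
  rw [hstop]
  exact h1.trans (h2.append_right _)

theorem hits_zero (l c : List Char) :
    hits l c 0 = ((List.range l.length).filter (occAt l c)).map (fun (i : Nat) => (i : Int)) := by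
  unfold hits
  have h : (List.range l.length).filter (fun i => 0 ≤ i && occAt l c i)
      = (List.range l.length).filter (occAt l c) := by
    apply List.filter_congr
    intro i _
    simp
  rw [h]

theorem portB_eq (seq : String) : stop_positions_alt seq = stop_positions seq := by
  have hA := portA_eq seq
  unfold stop_positions_alt
  simp only [List.foldl_cons, List.foldl_nil, List.nil_append]
  set s := clean_seq seq with hs
  set l := s.toList with hl
  rw [findAll_eq s "TAA" (by decide) (l.length + 1) 0 (Nat.zero_le _) (by rw [← hl]; omega),
      findAll_eq s "TAG" (by decide) (l.length + 1) 0 (Nat.zero_le _) (by rw [← hl]; omega),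
      findAll_eq s "TGA" (by decide) (l.length + 1) 0 (Nat.zero_le _) (by rw [← hl]; omega)]
  apply PySem.List.sorted_eq_of_perm_of_pairwise_lt
  · rw [hA, hits_zero, hits_zero, hits_zero, ← List.map_append, ← List.map_append]
    exact (stop_filter_perm l).map _
  · rw [hA]
    rw [List.pairwise_map]
    refine List.Pairwise.imp ?_ ((List.pairwise_lt_range).filter _)
    intro a b hab
    exact_mod_cast hab

-- ===== VERDICT (by name: the statement is the Claim_ definition above) =====
theorem stop_positions_spec : Claim_equal_stop_positions := by
  intro seq _ _
  unfold Spec_stop_positions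
  exact (portB_eq seq).symm
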